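-- pv_equiv track=rewrite | github.com/hammond756/NLP1_IR | DialogDataset.py | createEmbeddings
-- ===== SOURCE A (Python) =====
-- from collections import Counter,defaultdict
--
-- def createEmbeddings (words, threshold):
--     w2i = defaultdict(lambda: len(w2i))
--     i2w = dict()
--     wordCounts = Counter()
--
--     # count all the words in lower case
--     for word in words:
--         wordCounts[word.lower()] += 1
--
--     # index all words that occured at least n times
--     for word, count in wordCounts.most_common():
--         if count >= threshold:
--             i2w[w2i[word]] = word
--         else:
--             break
--
--     return w2i, i2w
-- ===== SOURCE B (Python) =====
-- from collections import Counter, defaultdict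
--
-- def createEmbeddings(words, threshold):
--     w2i = defaultdict(lambda: len(w2i))
--     i2w = dict()
--     counts = Counter()
--     for word in words:
--         counts[word.lower()] += 1
--
--     # sweep count levels from the highest down to the threshold; no sorting at
--     # all (counts are never below 1, so the sweep never goes below level 1)
--     top = max(counts.values(), default=0)
--     for level in range(top, max(threshold, 1) - 1, -1):
--         for word, count in counts.items():
--             if count == level:
--                 i2w[w2i[word]] = word
--
--     return w2i, i2w
-- ===== Notes on version B (the rewrite author's own statement) =====
-- stated objective: alternative
-- what changed: B never sorts: instead of most_common()'s comparison sort plus a prefix/break, it computes the maximum count and sweeps count levels downward from it to the threshold, scanning the counter once per level and assigning every word whose count equals the current level.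
import Mathlib
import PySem

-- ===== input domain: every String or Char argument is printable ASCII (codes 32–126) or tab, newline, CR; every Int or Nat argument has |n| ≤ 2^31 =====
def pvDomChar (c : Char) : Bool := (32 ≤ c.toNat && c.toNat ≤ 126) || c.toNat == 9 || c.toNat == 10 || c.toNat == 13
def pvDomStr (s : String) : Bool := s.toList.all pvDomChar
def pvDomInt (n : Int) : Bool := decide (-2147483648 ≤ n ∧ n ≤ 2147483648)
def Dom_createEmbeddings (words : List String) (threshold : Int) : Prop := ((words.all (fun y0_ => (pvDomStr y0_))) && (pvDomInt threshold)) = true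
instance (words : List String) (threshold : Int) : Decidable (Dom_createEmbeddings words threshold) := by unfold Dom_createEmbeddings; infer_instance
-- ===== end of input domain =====

-- B never sorts: instead of most_common()'s comparison sort plus a prefix/break, it sweeps
-- count levels downward from the maximum count to the threshold, scanning the counter once
-- per level; same return value.

-- ===== PORT A =====
-- `i2w[w2i[word]] = word` where w2i is defaultdict(lambda: len(w2i)); this exact Python
-- statement occurs in both A and B, so both ports use this helper.
def pyAssign (acc : PySem.Dict String Int × PySem.Dict Int String) (word : String) :
    PySem.Dict String Int × PySem.Dict Int String :=
  match acc.1.get? word with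
  | some v => (acc.1, acc.2.insert v word)
  | none => (acc.1.insert word ((acc.1.size : Int)), acc.2.insert ((acc.1.size : Int)) word)

-- A's `for word, count in wordCounts.most_common(): if count >= threshold: … else: break`
def loopA (threshold : Int) :
    List (String × Int) → PySem.Dict String Int × PySem.Dict Int String →
    PySem.Dict String Int × PySem.Dict Int String
  | [], acc => acc
  | (word, count) :: rest, acc =>
    if count ≥ threshold then loopA threshold rest (pyAssign acc word) else acc

def createEmbeddings (words : List String) (threshold : Int) :
    (List (String × Int)) × (List (Int × String)) :=
  let wordCounts : PySem.Dict String Int :=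
    words.foldl (fun d word => d.modify (PySem.Str.lower word) 0 (· + 1)) PySem.Dict.empty
  let p := loopA threshold (PySem.List.sorted wordCounts.items (fun kv => kv.2) true)
      (PySem.Dict.empty, PySem.Dict.empty)
  (p.1.items, p.2.items)

-- ===== PORT B =====
-- B's `for level in range(top, max(threshold, 1) - 1, -1): for word, count in counts.items():
--        if count == level: i2w[w2i[word]] = word`
def createEmbeddings_alt (words : List String) (threshold : Int) :
    (List (String × Int)) × (List (Int × String)) :=
  let counts : PySem.Dict String Int :=
    words.foldl (fun d word => d.modify (PySem.Str.lower word) 0 (· + 1)) PySem.Dict.empty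
  let top := PySem.List.maxD counts.values (fun v => v) 0
  let p := (PySem.List.pyRange top (max threshold 1 - 1) (-1)).foldl
      (fun acc level => counts.items.foldl
        (fun a kv => if kv.2 == level then pyAssign a kv.1 else a) acc)
      (PySem.Dict.empty, PySem.Dict.empty)
  (p.1.items, p.2.items)

-- ===== PRECONDITION & SPEC =====
def Spec_createEmbeddings (words : List String) (threshold : Int) (out : (List (String × Int)) × (List (Int × String))) : Prop := out = createEmbeddings_alt words threshold
instance (words : List String) (threshold : Int) (out : (List (String × Int)) × (List (Int × String))) : Decidable (Spec_createEmbeddings words threshold out) := by unfold Spec_createEmbeddings; infer_instance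

-- ===== CLAIM (what is proved, stated in full; the proofs are below) =====
def Claim_equal_createEmbeddings : Prop := ∀ (words : List String) (threshold : Int), Dom_createEmbeddings words threshold → Spec_createEmbeddings words threshold (createEmbeddings words threshold)

-- ===== LEMMAS AND PROOFS =====

theorem insertBy_cons {α : Type} (bef : α → α → Bool) (x y : α) (ys : List α) :
    PySem.List.insertBy bef x (y :: ys) =
      if bef x y then x :: y :: ys else y :: PySem.List.insertBy bef x ys := rfl

theorem insertBy_all_true {α : Type} (bef : α → α → Bool) (x : α) (ys : List α)
    (h : ∀ y ∈ ys, bef x y = true) :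
    PySem.List.insertBy bef x ys = x :: ys := by
  cases ys with
  | nil => rfl
  | cons y t => rw [insertBy_cons, h y (List.mem_cons_self)]; simp

theorem insertBy_append_left {α : Type} (bef : α → α → Bool) (x : α) (l r : List α)
    (h : ∀ y ∈ l, bef x y = false) :
    PySem.List.insertBy bef x (l ++ r) = l ++ PySem.List.insertBy bef x r := by
  induction l with
  | nil => rfl
  | cons y t ih =>
      rw [List.cons_append, insertBy_cons, h y (List.mem_cons_self)]
      simp only [Bool.false_eq_true, if_false, List.cons_append]
      rw [ih (fun z hz => h z (List.mem_cons_of_mem _ hz))]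

theorem insertBy_flatMap {α : Type} (f : α → Int) (x : α) (cs : List Int) (B : Int → List α)
    (hp : cs.Pairwise (· > ·)) (hB : ∀ c ∈ cs, ∀ y ∈ B c, f y = c) (hmem : f x ∈ cs) :
    PySem.List.insertBy (fun a b => decide (f b < f a)) x (cs.flatMap B)
      = cs.flatMap (fun c => if c = f x then B c ++ [x] else B c) := by
  induction cs with
  | nil => cases hmem
  | cons c cs ih =>
      rw [List.flatMap_cons, List.flatMap_cons]
      rcases List.pairwise_cons.mp hp with ⟨hgt, hp'⟩
      by_cases hc : c = f x
      · rw [insertBy_append_left _ _ _ _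
          (fun y hy => by
            have h1 := hB c List.mem_cons_self y hy
            simp [h1, hc])]
        rw [insertBy_all_true _ _ _ (fun y hy => by
          rcases List.mem_flatMap.mp hy with ⟨c', hc', hy'⟩
          have h1 := hB c' (List.mem_cons_of_mem _ hc') y hy'
          have h2 := hgt c' hc'
          simp only [h1, decide_eq_true_eq]
          omega)]
        rw [if_pos hc]
        have heq : (cs.flatMap fun c' => if c' = f x then B c' ++ [x] else B c')
            = cs.flatMap B := by
          apply List.flatMap_congr
          intro c' hc'
          have h2 := hgt c' hc'
          have : ¬ (c' = f x) := by omega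
          simp [this]
        rw [heq]
        simp
      · have hmem' : f x ∈ cs := by
          rcases List.mem_cons.mp hmem with h | h
          · exact absurd h.symm hc
          · assumption
        rw [insertBy_append_left _ _ _ _ (fun y hy => by
          have : f y = c := hB c List.mem_cons_self y hy
          have : f x < f y := by rw [this]; exact hgt (f x) hmem'
          simp; omega)]
        rw [ih hp' (fun c' hc' y hy => hB c' (List.mem_cons_of_mem _ hc') y hy) hmem']
        have : ¬ (c = f x) := hc
        simp [this]

theorem sorted_rev_eq_flatMap {α : Type} (f : α → Int) (xs : List α) (cs : List Int)
    (hp : cs.Pairwise (· > ·)) (hcov : ∀ y ∈ xs, f y ∈ cs) :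
    PySem.List.sorted xs f true = cs.flatMap (fun c => xs.filter (fun y => f y == c)) := by
  rw [PySem.List.sorted_rev_eq_foldl_insertBy]
  induction xs using List.reverseRecOn with
  | nil => simp
  | append_singleton xs x ih =>
      rw [List.foldl_append, List.foldl_cons, List.foldl_nil]
      rw [ih (fun y hy => hcov y (List.mem_append_left _ hy))]
      rw [insertBy_flatMap f x cs _ hp
        (fun c hc y hy => by
          have := List.mem_filter.mp hy
          exact beq_iff_eq.mp this.2)
        (hcov x (List.mem_append_right _ List.mem_cons_self))]
      apply List.flatMap_congr
      intro c hc
      by_cases h : c = f x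
      · subst h; simp [List.filter_append]
      · have h2 : ¬ (f x = c) := fun hh => h hh.symm
        simp [List.filter_append, h, h2]

theorem pairwise_gt_of_sorted_rev_nodup (ks : List Int) (hnd : ks.Nodup) :
    (PySem.List.sorted ks (fun c => c) true).Pairwise (· > ·) := by
  have h1 : (PySem.List.sorted ks (fun c => c) true).Pairwise (fun a b => b ≤ a) :=
    PySem.List.sorted_pairwise_rev ks (fun c => c)
  have h2 : (PySem.List.sorted ks (fun c => c) true).Nodup :=
    (PySem.List.sorted_perm ks (fun c => c) true).nodup_iff.mpr hnd
  have := List.Pairwise.and h1 h2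
  exact this.imp (fun h => lt_of_le_of_ne h.1 (Ne.symm h.2))

theorem loopA_all_ge (t : Int) (l1 l2 : List (String × Int))
    (acc : PySem.Dict String Int × PySem.Dict Int String)
    (h : ∀ kv ∈ l1, t ≤ kv.2) :
    loopA t (l1 ++ l2) acc = loopA t l2 (l1.foldl (fun a kv => pyAssign a kv.1) acc) := by
  induction l1 generalizing acc with
  | nil => rfl
  | cons kv l1 ih =>
      obtain ⟨w, c⟩ := kv
      rw [List.cons_append, List.foldl_cons]
      show (if c ≥ t then _ else _) = _
      rw [if_pos (h (w, c) List.mem_cons_self)]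
      exact ih _ (fun kv hkv => h kv (List.mem_cons_of_mem _ hkv))

theorem loopA_all_lt (t : Int) (l2 : List (String × Int))
    (acc : PySem.Dict String Int × PySem.Dict Int String)
    (h : ∀ kv ∈ l2, kv.2 < t) :
    loopA t l2 acc = acc := by
  cases l2 with
  | nil => rfl
  | cons kv l2 =>
      obtain ⟨w, c⟩ := kv
      show (if c ≥ t then _ else _) = _
      rw [if_neg (by have := h (w, c) List.mem_cons_self; simp at this ⊢; omega)]

theorem foldl_flatMap {α β : Type} (g : Int → List α) (cs : List Int)
    (step : β → α → β) (acc : β) :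
    (cs.flatMap g).foldl step acc = cs.foldl (fun a c => (g c).foldl step a) acc := by
  induction cs generalizing acc with
  | nil => rfl
  | cons c cs ih => rw [List.flatMap_cons, List.foldl_append, List.foldl_cons, ih]

theorem dropWhile_all_lt (t : Int) (cs : List Int) (hp : cs.Pairwise (· > ·)) :
    ∀ c ∈ cs.dropWhile (fun c => decide (t ≤ c)), c < t := by
  induction cs with
  | nil => intro c hc; cases hc
  | cons c cs ih =>
      rcases List.pairwise_cons.mp hp with ⟨hgt, hp'⟩
      intro c' hc'
      rw [List.dropWhile_cons] at hc'
      by_cases h : t ≤ c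
      · simp only [decide_eq_true h, if_pos] at hc'
        exact ih hp' c' hc'
      · simp only [decide_eq_false h, Bool.false_eq_true, if_false] at hc'
        rcases List.mem_cons.mp hc' with heq | hmem
        · omega
        · have := hgt c' hmem; omega

theorem mem_takeWhile_of_pairwise (t : Int) (cs : List Int) (hp : cs.Pairwise (· > ·))
    (c : Int) (hmem : c ∈ cs) (hc : t ≤ c) :
    c ∈ cs.takeWhile (fun c => decide (t ≤ c)) := by
  induction cs with
  | nil => cases hmem
  | cons a cs ih =>
      rcases List.pairwise_cons.mp hp with ⟨hgt, hp'⟩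
      rcases List.mem_cons.mp hmem with heq | hmem'
      · subst heq
        rw [List.takeWhile_cons, if_pos (by simpa using hc)]
        exact List.mem_cons_self
      · have hac : c < a := hgt c hmem'
        rw [List.takeWhile_cons, if_pos (by simp; omega)]
        exact List.mem_cons_of_mem _ (ih hp' hmem')

theorem flatMap_filter_nonempty {α : Type} (g : Int → List α) (P : Int → Bool) (cs : List Int)
    (h : ∀ c, P c = false → g c = []) :
    cs.flatMap g = (cs.filter P).flatMap g := by
  induction cs with
  | nil => rfl
  | cons c cs ih =>
      rw [List.flatMap_cons, List.filter_cons]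
      by_cases hc : P c = true
      · rw [if_pos hc, List.flatMap_cons, ih]
      · rw [if_neg hc, h c (by revert hc; cases P c <;> simp), List.nil_append, ih]

theorem desc_eq_of_mem_iff (l1 : List Int) :
    ∀ (l2 : List Int), l1.Pairwise (· > ·) → l2.Pairwise (· > ·) →
    (∀ c, c ∈ l1 ↔ c ∈ l2) → l1 = l2 := by
  induction l1 with
  | nil =>
      intro l2 _ _ hm
      cases l2 with
      | nil => rfl
      | cons b t2 => exact absurd ((hm b).mpr List.mem_cons_self) (by simp)
  | cons a t1 ih =>
      intro l2 hp1 hp2 hm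
      cases l2 with
      | nil => exact absurd ((hm a).mp List.mem_cons_self) (by simp)
      | cons b t2 =>
          rcases List.pairwise_cons.mp hp1 with ⟨hgt1, hp1'⟩
          rcases List.pairwise_cons.mp hp2 with ⟨hgt2, hp2'⟩
          have hab : a = b := by
            have h1 : a ∈ b :: t2 := (hm a).mp List.mem_cons_self
            have h2 : b ∈ a :: t1 := (hm b).mpr List.mem_cons_self
            rcases List.mem_cons.mp h1 with h | h
            · exact h
            · rcases List.mem_cons.mp h2 with h' | h'
              · exact h'.symm
              · have := hgt2 a h; have := hgt1 b h'; omega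
          subst hab
          have : t1 = t2 := by
            apply ih t2 hp1' hp2'
            intro c
            constructor
            · intro hc
              have : c ∈ a :: t2 := (hm c).mp (List.mem_cons_of_mem _ hc)
              rcases List.mem_cons.mp this with h | h
              · subst h; exact absurd (hgt1 c hc) (by omega)
              · exact h
            · intro hc
              have : c ∈ a :: t1 := (hm c).mpr (List.mem_cons_of_mem _ hc)
              rcases List.mem_cons.mp this with h | h
              · subst h; exact absurd (hgt2 c hc) (by omega)
              · exact h
          rw [this]

theorem pairwise_gt_pyRange_neg_one (a b : Int) :
    (PySem.List.pyRange a b (-1)).Pairwise (· > ·) := by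
  rw [PySem.List.pyRange_neg_one]
  exact (List.pairwise_lt_range).map _ (fun i j hij => by omega)

-- the shared core: A's sorted-prefix loop equals B's downward level sweep, for any item
-- list of positive counts bounded by `top`
theorem core (t top : Int) (items : List (String × Int))
    (hpos : ∀ kv ∈ items, 1 ≤ kv.2) (htop : ∀ kv ∈ items, kv.2 ≤ top) :
    loopA t (PySem.List.sorted items (fun kv => kv.2) true) (PySem.Dict.empty, PySem.Dict.empty)
      = (PySem.List.pyRange top (max t 1 - 1) (-1)).foldl
          (fun acc level => items.foldl
            (fun a kv => if kv.2 == level then pyAssign a kv.1 else a) acc)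
          (PySem.Dict.empty, PySem.Dict.empty) := by
  classical
  set g : Int → List (String × Int) := fun c => items.filter (fun kv => kv.2 == c) with hg
  set P : Int → Bool := fun c => items.any (fun kv => kv.2 == c) with hP
  have hPmem : ∀ c, P c = true ↔ ∃ kv ∈ items, kv.2 = c := by
    intro c; simp [hP]
  have hPempty : ∀ c, P c = false → g c = [] := by
    intro c hc
    rw [hg]
    simp only [List.filter_eq_nil_iff]
    intro kv hkv
    intro hbe
    have : P c = true := (hPmem c).mpr ⟨kv, hkv, beq_iff_eq.mp hbe⟩
    rw [hc] at this; cases this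
  set cs : List Int :=
    PySem.List.sorted (PySem.Set.ofList (items.map (fun kv => kv.2))) (fun c => c) true with hcs
  have hcsnd : (PySem.Set.ofList (items.map (fun kv => kv.2))).Nodup :=
    PySem.Set.nodup_ofList _
  have hpcs : cs.Pairwise (· > ·) := pairwise_gt_of_sorted_rev_nodup _ hcsnd
  have hmemcs : ∀ c, c ∈ cs ↔ c ∈ items.map (fun kv => kv.2) := by
    intro c
    rw [hcs, PySem.List.mem_sorted, PySem.Set.mem_ofList]
  have hcov : ∀ y ∈ items, (fun kv : String × Int => kv.2) y ∈ cs := by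
    intro y hy
    exact (hmemcs y.2).mpr (List.mem_map_of_mem hy)
  -- A side: sorted items is the flatMap of per-count groups, descending
  have hs : PySem.List.sorted items (fun kv => kv.2) true = cs.flatMap g :=
    sorted_rev_eq_flatMap _ items cs hpcs hcov
  set csA := cs.takeWhile (fun c => decide (t ≤ c)) with hcsA
  have hsplit : cs = csA ++ cs.dropWhile (fun c => decide (t ≤ c)) :=
    (List.takeWhile_append_dropWhile).symm
  have hpA : csA.Pairwise (· > ·) := hpcs.sublist (List.takeWhile_sublist _)
  have hA : loopA t (PySem.List.sorted items (fun kv => kv.2) true)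
        (PySem.Dict.empty, PySem.Dict.empty)
      = (csA.flatMap g).foldl (fun a kv => pyAssign a kv.1)
        (PySem.Dict.empty, PySem.Dict.empty) := by
    rw [hs]
    conv_lhs => rw [hsplit]
    rw [List.flatMap_append]
    rw [loopA_all_ge _ _ _ _ (fun kv hkv => by
      rcases List.mem_flatMap.mp hkv with ⟨c, hc, hkv'⟩
      have h1 : kv.2 = c := beq_iff_eq.mp (List.mem_filter.mp hkv').2
      have h2 : t ≤ c := by
        rw [hcsA] at hc
        exact of_decide_eq_true (List.mem_takeWhile_imp (p := fun c => decide (t ≤ c)) hc)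
      omega)]
    rw [loopA_all_lt _ _ _ (fun kv hkv => by
      rcases List.mem_flatMap.mp hkv with ⟨c, hc, hkv'⟩
      have h1 : kv.2 = c := beq_iff_eq.mp (List.mem_filter.mp hkv').2
      have h2 : c < t := dropWhile_all_lt t cs hpcs c hc
      omega)]
  -- B side: the level sweep is the flatMap of the same groups over the level range
  set csB := PySem.List.pyRange top (max t 1 - 1) (-1) with hcsB
  have hpB : csB.Pairwise (· > ·) := pairwise_gt_pyRange_neg_one _ _
  have hB : csB.foldl
        (fun acc level => items.foldl
          (fun a kv => if kv.2 == level then pyAssign a kv.1 else a) acc)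
        (PySem.Dict.empty, PySem.Dict.empty)
      = (csB.flatMap g).foldl (fun a kv => pyAssign a kv.1)
        (PySem.Dict.empty, PySem.Dict.empty) := by
    rw [foldl_flatMap]
    congr 1
    funext a c
    rw [hg]
    exact (List.foldl_filter).symm
  -- the two flatMaps agree: restrict both level lists to inhabited levels
  have hfilter : csA.filter P = csB.filter P := by
    apply desc_eq_of_mem_iff _ _ (hpA.filter _) (hpB.filter _)
    intro c
    rw [List.mem_filter, List.mem_filter]
    constructor
    · rintro ⟨hc, hpc⟩
      refine ⟨?_, hpc⟩
      rcases (hPmem c).mp hpc with ⟨kv, hkv, hkvc⟩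
      have h1 : 1 ≤ c := by have := hpos kv hkv; omega
      have h2 : c ≤ top := by have := htop kv hkv; omega
      rw [hcsA] at hc
      have h3 : t ≤ c := of_decide_eq_true (List.mem_takeWhile_imp (p := fun c => decide (t ≤ c)) hc)
      rw [hcsB, PySem.List.mem_pyRange_neg_one]
      omega
    · rintro ⟨hc, hpc⟩
      refine ⟨?_, hpc⟩
      rcases (hPmem c).mp hpc with ⟨kv, hkv, hkvc⟩
      rw [hcsB, PySem.List.mem_pyRange_neg_one] at hc
      have h3 : t ≤ c := by omega
      rw [hcsA]
      apply mem_takeWhile_of_pairwise t cs hpcs c ?_ h3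
      exact (hmemcs c).mpr (by subst hkvc; exact List.mem_map_of_mem hkv)
  have hflat : csA.flatMap g = csB.flatMap g := by
    rw [flatMap_filter_nonempty g P csA hPempty, flatMap_filter_nonempty g P csB hPempty,
      hfilter]
  rw [hA, hB, hflat]

-- ===== VERDICT (by name: the statement is the Claim_ definition above) =====
theorem createEmbeddings_spec : Claim_equal_createEmbeddings := by
  intro words threshold _
  unfold Spec_createEmbeddings createEmbeddings createEmbeddings_alt
  dsimp only
  set counts : PySem.Dict String Int :=
    words.foldl (fun d word => d.modify (PySem.Str.lower word) 0 (· + 1)) PySem.Dict.empty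
    with hcounts
  have hnd : counts.keys.Nodup := by
    rw [hcounts]
    exact PySem.Dict.nodup_keys_foldl_modify_key words PySem.Str.lower 0
      (fun _ _ => (· + 1)) PySem.Dict.empty (by simp [PySem.Dict.empty, PySem.Dict.keys])
  have hitems : counts.items = counts.keys.map (fun k => (k, counts.getD k 0)) :=
    PySem.Dict.items_eq_map_keys counts hnd 0
  have hgetD : ∀ k, counts.getD k 0 = ((words.map PySem.Str.lower).count k : Int) := by
    intro k
    rw [hcounts,
      ← List.foldl_map (f := PySem.Str.lower)
        (g := fun d x => PySem.Dict.modify d x 0 (· + 1)) (l := words)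
        (init := PySem.Dict.empty),
      PySem.Dict.getD_foldl_modify_add_one]
    simp
  have hkeysmem : ∀ k ∈ counts.keys, k ∈ words.map PySem.Str.lower := by
    intro k hk
    by_contra hnot
    have h0 : counts.getD k 0 = 0 := by
      rw [hgetD k, List.count_eq_zero_of_not_mem hnot]; rfl
    -- a key of the counting fold always has positive count
    rw [hcounts, PySem.Dict.keys_foldl_modify_key] at hk
    have : k ∈ (PySem.Dict.empty : PySem.Dict String Int).keys ∨ k ∈ words.map PySem.Str.lower := by
      have := (PySem.Set.mem_update _ _ _).mp hk
      tauto
    rcases this with h | h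
    · simp [PySem.Dict.empty, PySem.Dict.keys] at h
    · exact hnot h
  have hpos : ∀ kv ∈ counts.items, 1 ≤ kv.2 := by
    intro kv hkv
    rw [hitems] at hkv
    rcases List.mem_map.mp hkv with ⟨k, hk, hkeq⟩
    have hkin : k ∈ words.map PySem.Str.lower := hkeysmem k hk
    have : 1 ≤ (words.map PySem.Str.lower).count k := List.count_pos_iff.mpr hkin
    rw [← hkeq]
    simp only [hgetD k]
    omega
  have htop : ∀ kv ∈ counts.items,
      kv.2 ≤ PySem.List.maxD counts.values (fun v => v) 0 := by
    intro kv hkv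
    have hvmem : kv.2 ∈ counts.values := by
      show kv.2 ∈ counts.items.map (·.2)
      exact List.mem_map_of_mem hkv
    have hne : counts.values ≠ [] := by
      intro h; rw [h] at hvmem; cases hvmem
    rcases Option.ne_none_iff_exists'.mp
        ((not_iff_not.mpr (PySem.List.max?_eq_none_iff counts.values (fun v => v))).mpr hne) with ⟨m, hm⟩
    have : PySem.List.maxD counts.values (fun v => v) 0 = m := by
      rw [PySem.List.maxD, hm]; rfl
    rw [this]
    exact PySem.List.max?_isMax hm kv.2 hvmem
  rw [core threshold (PySem.List.maxD counts.values (fun v => v) 0) counts.items hpos htop]
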